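-- pv_equiv track=rewrite | github.com/Hashmire/Analysis_Tools | src/analysis_tool/processData.py | validate_cpe_specificity
-- ===== SOURCE A (Python) =====
-- def validate_cpe_specificity(cpe_string):
--     """
--     Check if a CPE string has enough specificity (requires at least vendor OR product).
--     Returns (is_valid, reason) tuple.
--     """
--     if not cpe_string or not cpe_string.startswith('cpe:2.3:'):
--         return False, "Invalid CPE format"
--
--     # Split the CPE string and check components
--     parts = cpe_string.split(':')
--     if len(parts) < 13:  # CPE 2.3 should have 13 parts
--         return False, "Incomplete CPE format"
--
--     # Check if we have at least vendor OR product specified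
--     # Allow CPE strings with at least vendor OR product (handles Unicode normalization cases)
--     vendor_component = parts[3] if len(parts) > 3 else '*'
--     product_component = parts[4] if len(parts) > 4 else '*'
--
--     has_vendor = vendor_component and vendor_component != '*' and vendor_component.strip() != ''
--     has_product = product_component and product_component != '*' and product_component.strip() != ''
--
--     if not has_vendor and not has_product:
--         return False, "Both vendor and product are wildcards or empty"
--
--     # Check for completely wildcard CPE (all components are *)
--     non_wildcard_count = 0
--     for component in parts[2:13]:  # Skip 'cpe' and '2.3'
--         if component and component != '*' and component.strip() != '':
--             non_wildcard_count += 1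
--
--     if non_wildcard_count == 0:
--         return False, "All components are wildcards"
--
--     return True, "Valid specificity"
-- ===== SOURCE B (Python) =====
-- # Rule-table re-implementation: parse first (split on ':'), then walk an ordered
-- # table of (failure predicate, verdict) rules; the prefix check is done on the
-- # parsed components instead of the raw string, and A's dead counting loop is gone.
--
-- _WILDCARDY = ('', '*')
--
-- def _unspecific(c):
--     return c in _WILDCARDY or c.strip() == ''
--
-- _RULES = (
--     (lambda p: len(p) < 3 or p[0] != 'cpe' or p[1] != '2.3',
--      (False, "Invalid CPE format")),
--     (lambda p: len(p) < 13,
--      (False, "Incomplete CPE format")),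
--     (lambda p: _unspecific(p[3]) and _unspecific(p[4]),
--      (False, "Both vendor and product are wildcards or empty")),
-- )
--
-- def validate_cpe_specificity(cpe_string):
--     parts = cpe_string.split(':') if cpe_string else []
--     for failed, verdict in _RULES:
--         if failed(parts):
--             return verdict
--     return True, "Valid specificity"
-- ===== Notes on version B (the rewrite author's own statement) =====
-- stated objective: alternative
-- what changed: B parses first (split on the separator) and validates the CPE header on the parsed components instead of A's raw-string startswith check, then selects the verdict by walking an ordered table of (failure predicate, verdict) rules, dropping A's unreachable counting pass over the component slice.
import Mathlib
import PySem

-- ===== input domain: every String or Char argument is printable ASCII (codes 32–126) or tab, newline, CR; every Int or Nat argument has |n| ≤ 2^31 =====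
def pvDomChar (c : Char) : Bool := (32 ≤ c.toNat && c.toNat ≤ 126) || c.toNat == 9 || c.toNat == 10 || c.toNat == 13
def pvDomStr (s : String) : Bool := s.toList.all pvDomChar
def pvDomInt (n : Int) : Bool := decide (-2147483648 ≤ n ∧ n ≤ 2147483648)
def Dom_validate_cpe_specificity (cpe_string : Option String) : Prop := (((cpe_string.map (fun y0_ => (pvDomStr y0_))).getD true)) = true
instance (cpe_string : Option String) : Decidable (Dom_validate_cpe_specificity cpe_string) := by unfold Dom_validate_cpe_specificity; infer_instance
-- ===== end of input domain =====

-- B parses first (split on the separator), validates the CPE header on the parsed components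
-- instead of a raw-string startswith, and selects the verdict from an ordered rule table,
-- dropping A's unreachable counting pass; equivalence is proved below.

-- ===== PORT A =====
def validate_cpe_specificity (cpe_string : Option String) : Bool × String :=
  match cpe_string with
  | none => (false, "Invalid CPE format")
  | some s =>
    if s = "" || !(PySem.Str.startswith s "cpe:2.3:") then (false, "Invalid CPE format")
    else
      let parts := (PySem.Str.split? s ":").getD []
      if parts.length < 13 then (false, "Incomplete CPE format")
      else
        let vendor_component := if 3 < parts.length then (PySem.List.pyGet? parts 3).getD "" else "*"
        let product_component := if 4 < parts.length then (PySem.List.pyGet? parts 4).getD "" else "*"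
        let has_vendor := vendor_component ≠ "" && vendor_component ≠ "*" && PySem.Str.strip vendor_component ≠ ""
        let has_product := product_component ≠ "" && product_component ≠ "*" && PySem.Str.strip product_component ≠ ""
        if !has_vendor && !has_product then (false, "Both vendor and product are wildcards or empty")
        else
          let non_wildcard_count := (PySem.List.slice parts (some 2) (some 13)).foldl
            (fun acc component =>
              if component ≠ "" && component ≠ "*" && PySem.Str.strip component ≠ "" then acc + 1 else acc) 0
          if non_wildcard_count = 0 then (false, "All components are wildcards")
          else (true, "Valid specificity")

-- ===== PORT B =====
-- _unspecific(c): c in ('', '*') or c.strip() == ''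
def pvUnspecific (c : String) : Bool := (c = "" || c = "*") || PySem.Str.strip c = ""

-- the ordered rule table _RULES: (failure predicate, verdict)
def pvRules : List ((List String → Bool) × (Bool × String)) :=
  [ (fun p => decide (p.length < 3) || (PySem.List.pyGet? p 0).getD "" ≠ "cpe" || (PySem.List.pyGet? p 1).getD "" ≠ "2.3",
     (false, "Invalid CPE format")),
    (fun p => decide (p.length < 13),
     (false, "Incomplete CPE format")),
    (fun p => pvUnspecific ((PySem.List.pyGet? p 3).getD "") && pvUnspecific ((PySem.List.pyGet? p 4).getD ""),
     (false, "Both vendor and product are wildcards or empty")) ]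

def validate_cpe_specificity_alt (cpe_string : Option String) : Bool × String :=
  let parts : List String :=
    match cpe_string with
    | none => []
    | some s => if s = "" then [] else (PySem.Str.split? s ":").getD []
  match pvRules.findSome? (fun r => if r.1 parts then some r.2 else none) with
  | some verdict => verdict
  | none => (true, "Valid specificity")

-- ===== PRECONDITION & SPEC =====
def Spec_validate_cpe_specificity (cpe_string : Option String) (out : Bool × String) : Prop := out = validate_cpe_specificity_alt cpe_string
instance (cpe_string : Option String) (out : Bool × String) : Decidable (Spec_validate_cpe_specificity cpe_string out) := by unfold Spec_validate_cpe_specificity; infer_instance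

-- ===== CLAIM (what is proved, stated in full; the proofs are below) =====
def Claim_equal_validate_cpe_specificity : Prop := ∀ (cpe_string : Option String), Dom_validate_cpe_specificity cpe_string → Spec_validate_cpe_specificity cpe_string (validate_cpe_specificity cpe_string)

-- ===== LEMMAS AND PROOFS =====

-- A simple structural model of str.split(':') on the character list, used only in the proofs.
def pvConsHead (c : Char) : List (List Char) → List (List Char)
  | [] => [[c]]
  | h :: t => (c :: h) :: t

def pvSplitC : List Char → List (List Char)
  | [] => [[]]
  | c :: rest => if c = ':' then [] :: pvSplitC rest else pvConsHead c (pvSplitC rest)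

def pvJoinC : List (List Char) → List Char
  | [] => []
  | [x] => x
  | x :: xs => x ++ ':' :: pvJoinC xs

theorem pvSplitC_ne_nil (l : List Char) : pvSplitC l ≠ [] := by
  induction l with
  | nil => simp [pvSplitC]
  | cons c rest ih =>
    simp only [pvSplitC]
    split
    · simp
    · cases h : pvSplitC rest with
      | nil => exact absurd h ih
      | cons a b => simp [pvConsHead]

theorem pvJoinC_splitC (l : List Char) : pvJoinC (pvSplitC l) = l := by
  induction l with
  | nil => rfl
  | cons c rest ih =>
    simp only [pvSplitC]
    by_cases hc : c = ':'
    · subst hc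
      rw [if_pos rfl]
      cases h : pvSplitC rest with
      | nil => exact absurd h (pvSplitC_ne_nil rest)
      | cons a b =>
        rw [h] at ih
        simp [pvJoinC, ih]
    · rw [if_neg hc]
      cases h : pvSplitC rest with
      | nil => exact absurd h (pvSplitC_ne_nil rest)
      | cons a b =>
        rw [h] at ih
        cases b with
        | nil => simp only [pvConsHead, pvJoinC] at ih ⊢; rw [ih]
        | cons b0 bs => simp only [pvConsHead, pvJoinC] at ih ⊢; rw [List.cons_append, ih]

-- one step of the library's fuelled splitter, related to pvSplitC
theorem pv_go_eq (fuel : Nat) (l cur : List Char) (acc : List (List Char)) (h : l.length < fuel) :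
    PySem.Chars.splitOn.go [':'] fuel l cur acc
      = acc.reverse ++ (match pvSplitC l with
          | [] => [cur.reverse]
          | h0 :: t => (cur.reverse ++ h0) :: t) := by
  induction fuel generalizing l cur acc with
  | zero => omega
  | succ fuel ih =>
    cases l with
    | nil =>
      rw [PySem.Chars.splitOn.go]
      simp [pvSplitC]
      all_goals omega
    | cons c rest =>
      by_cases hc : c = ':'
      · subst hc
        have hstep : PySem.Chars.splitOn.go [':'] (fuel+1) (':' :: rest) cur acc
            = PySem.Chars.splitOn.go [':'] fuel rest [] (cur.reverse :: acc) := by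
          rw [PySem.Chars.splitOn.go]
          simp [List.isPrefixOf]
        rw [hstep, ih rest [] (cur.reverse :: acc) (by simpa using Nat.lt_of_succ_lt_succ h)]
        cases hs : pvSplitC rest with
        | nil => exact absurd hs (pvSplitC_ne_nil rest)
        | cons a b => simp [pvSplitC, hs]
      · have hstep : PySem.Chars.splitOn.go [':'] (fuel+1) (c :: rest) cur acc
            = PySem.Chars.splitOn.go [':'] fuel rest (c :: cur) acc := by
          rw [PySem.Chars.splitOn.go]
          simp [List.isPrefixOf, Ne.symm hc]
        rw [hstep, ih rest (c :: cur) acc (by simpa using Nat.lt_of_succ_lt_succ h)]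
        cases hs : pvSplitC rest with
        | nil => exact absurd hs (pvSplitC_ne_nil rest)
        | cons a b => simp [pvSplitC, hs, if_neg hc, pvConsHead]

theorem pvSplitOn_eq_splitC (l : List Char) : PySem.Chars.splitOn l [':'] = pvSplitC l := by
  show PySem.Chars.splitOn.go [':'] (l.length + 1) l [] [] = pvSplitC l
  rw [pv_go_eq (l.length + 1) l [] [] (by omega)]
  cases hs : pvSplitC l with
  | nil => exact absurd hs (pvSplitC_ne_nil l)
  | cons a b => simp

theorem pv_parts_eq (s : String) :
    (PySem.Str.split? s ":").getD [] = (pvSplitC s.toList).map String.ofList := by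
  simp [PySem.Str.split?, PySem.Chars.split?, pvSplitOn_eq_splitC]

-- splitting off the literal header
theorem pvSplitC_header (t : List Char) :
    pvSplitC ("cpe:2.3:".toList ++ t) = "cpe".toList :: "2.3".toList :: pvSplitC t := by
  cases hs : pvSplitC t with
  | nil => exact absurd hs (pvSplitC_ne_nil t)
  | cons a b =>
    show pvSplitC ('c' :: 'p' :: 'e' :: ':' :: '2' :: '.' :: '3' :: ':' :: t) = _
    simp [pvSplitC, pvConsHead, hs]

-- the header shape of the split ↔ startswith('cpe:2.3:')
theorem pv_shape_iff (L : List Char) :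
    PySem.Chars.startswith L "cpe:2.3:".toList = true
      ↔ 3 ≤ (pvSplitC L).length ∧ (pvSplitC L)[0]? = some "cpe".toList
          ∧ (pvSplitC L)[1]? = some "2.3".toList := by
  constructor
  · intro h
    obtain ⟨t, ht⟩ := (PySem.Chars.startswith_iff L "cpe:2.3:".toList).mp h
    subst ht
    rw [pvSplitC_header]
    refine ⟨?_, rfl, rfl⟩
    have := List.length_pos_iff.mpr (pvSplitC_ne_nil t)
    simp
    omega
  · rintro ⟨hlen, h0, h1⟩
    cases hS : pvSplitC L with
    | nil => exact absurd hS (pvSplitC_ne_nil L)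
    | cons a b =>
      cases b with
      | nil => rw [hS] at hlen; simp at hlen
      | cons a1 rest =>
        cases rest with
        | nil => rw [hS] at hlen; simp at hlen
        | cons a2 rest' =>
          rw [hS] at h0 h1
          simp at h0 h1
          subst h0; subst h1
          apply (PySem.Chars.startswith_iff L "cpe:2.3:".toList).mpr
          have hjoin := pvJoinC_splitC L
          rw [hS] at hjoin
          refine ⟨pvJoinC (a2 :: rest'), ?_⟩
          rw [← hjoin]
          simp [pvJoinC]

-- the counting foldl is nonzero once some listed element satisfies the predicate
theorem pv_foldl_count (p : String → Bool) (l : List String) (n : Nat) :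
    l.foldl (fun acc c => if p c then acc + 1 else acc) n = n + (l.filter p).length := by
  induction l generalizing n with
  | nil => simp
  | cons c t ih =>
    by_cases h : p c = true
    · simp [List.foldl, h, ih]; omega
    · simp [List.foldl, h, ih]

theorem pv_count_pos (p : String → Bool) (l : List String) (c : String)
    (hc : c ∈ l) (hp : p c = true) :
    l.foldl (fun acc x => if p x then acc + 1 else acc) 0 ≠ 0 := by
  rw [pv_foldl_count]
  have : c ∈ l.filter p := List.mem_filter.mpr ⟨hc, hp⟩
  have := List.length_pos_of_mem this
  omega

theorem pv_mem_slice (parts : List String) (i : Nat) (h2 : 2 ≤ i) (hi : i < 13)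
    (hlen : 13 ≤ parts.length) :
    parts[i]'(by omega) ∈ PySem.List.slice parts (some 2) (some 13) := by
  have h : PySem.List.slice parts (some 2) (some 13) = (parts.drop 2).take 11 := by
    have h := PySem.List.slice_natCast parts 2 13
    norm_num at h
    exact h
  rw [h]
  have hidx : parts[i]'(by omega) = ((parts.drop 2).take 11)[i - 2]'
      (by simp [List.length_take, List.length_drop]; omega) := by
    rw [List.getElem_take, List.getElem_drop]
    congr 1
    omega
  rw [hidx]
  exact List.getElem_mem _

-- ===== VERDICT (by name: the statement is the Claim_ definition above) =====
theorem validate_cpe_specificity_spec : Claim_equal_validate_cpe_specificity := by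
  intro cpe_string _
  unfold Spec_validate_cpe_specificity
  match cpe_string with
  | none => rfl
  | some s =>
    by_cases hs : s = ""
    · subst hs; decide
    · unfold validate_cpe_specificity validate_cpe_specificity_alt
      simp only [if_neg hs]
      rw [pv_parts_eq s]
      by_cases hsw : PySem.Chars.startswith s.toList "cpe:2.3:".toList = true
      · -- header present
        obtain ⟨t, ht⟩ := (PySem.Chars.startswith_iff s.toList "cpe:2.3:".toList).mp hsw
        rw [← ht, pvSplitC_header]
        cases htl : pvSplitC t with
        | nil => exact absurd htl (pvSplitC_ne_nil t)
        | cons u us =>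
          set parts := (("cpe".toList : List Char) :: ("2.3".toList : List Char) :: u :: us).map String.ofList with hpartsdef
          have hlenp : parts.length = 3 + us.length := by simp [hpartsdef]; omega
          have hcond : ¬ ((decide (s = "") || !(PySem.Str.startswith s "cpe:2.3:")) = true) := by
            simp [hs]
            exact hsw
          rw [if_neg hcond]
          have hg0 : (PySem.List.pyGet? parts 0).getD "" = parts[0]'(by omega) := by
            have h0 : 0 < parts.length := by omega
            simp [PySem.List.pyGet?, PySem.List.pyIdx?, h0]
          have hg1 : (PySem.List.pyGet? parts 1).getD "" = parts[1]'(by omega) := by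
            have h1 : 1 < parts.length := by omega
            simp [PySem.List.pyGet?, PySem.List.pyIdx?, h1]
          have hp0 : parts[0]'(by omega) = "cpe" := by simp [hpartsdef]
          have hp1 : parts[1]'(by omega) = "2.3" := by simp [hpartsdef]
          by_cases h13 : parts.length < 13
          · -- incomplete
            rw [if_pos h13]
            simp [pvRules, List.findSome?, hg0, hg1, hp0, hp1,
              show ¬ (parts.length < 3) from by omega, h13]
          · rw [if_neg h13]
            have h3 : 3 < parts.length := by omega
            have h4 : 4 < parts.length := by omega
            have hg3 : (PySem.List.pyGet? parts 3).getD "" = parts[3]'(by omega) := by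
              simp [PySem.List.pyGet?, PySem.List.pyIdx?, h3]
            have hg4 : (PySem.List.pyGet? parts 4).getD "" = parts[4]'(by omega) := by
              simp [PySem.List.pyGet?, PySem.List.pyIdx?, h4]
            simp only [if_pos h3, if_pos h4, hg3, hg4]
            by_cases hu3 : pvUnspecific (parts[3]'(by omega)) = true
            · by_cases hu4 : pvUnspecific (parts[4]'(by omega)) = true
              · -- both unspecific: rule 3 fires, A's wildcard branch fires
                have hA : (!(decide (parts[3]'(by omega) ≠ "") && decide (parts[3]'(by omega) ≠ "*") && decide (PySem.Str.strip (parts[3]'(by omega)) ≠ "")) &&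
                    !(decide (parts[4]'(by omega) ≠ "") && decide (parts[4]'(by omega) ≠ "*") && decide (PySem.Str.strip (parts[4]'(by omega)) ≠ ""))) = true := by
                  simp [pvUnspecific] at hu3 hu4
                  rcases hu3 with (h | h) | h <;> rcases hu4 with (h' | h') | h' <;> simp [h, h']
                rw [if_pos hA]
                simp [pvRules, List.findSome?, hg0, hg1, hp0, hp1,
                  show ¬ (parts.length < 3) from by omega, h13, hg3, hg4, hu3, hu4]
              · -- product specific
                have hsp : parts[4]'(by omega) ≠ "" ∧ parts[4]'(by omega) ≠ "*" ∧ PySem.Str.strip (parts[4]'(by omega)) ≠ "" := by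
                  simp [pvUnspecific] at hu4
                  exact ⟨hu4.1.1, hu4.1.2, hu4.2⟩
                have hcnt : (PySem.List.slice parts (some 2) (some 13)).foldl
                    (fun acc component =>
                      if component ≠ "" && component ≠ "*" && PySem.Str.strip component ≠ "" then acc + 1 else acc) 0 ≠ 0 :=
                  pv_count_pos _ _ _ (pv_mem_slice parts 4 (by omega) (by omega) (by omega))
                    (by simp [hsp.1, hsp.2.1, hsp.2.2])
                have hA : ¬ ((!(decide (parts[3]'(by omega) ≠ "") && decide (parts[3]'(by omega) ≠ "*") && decide (PySem.Str.strip (parts[3]'(by omega)) ≠ "")) &&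
                    !(decide (parts[4]'(by omega) ≠ "") && decide (parts[4]'(by omega) ≠ "*") && decide (PySem.Str.strip (parts[4]'(by omega)) ≠ ""))) = true) := by
                  simp [hsp.1, hsp.2.1, hsp.2.2]
                rw [if_neg hA, if_neg hcnt]
                simp [pvRules, List.findSome?, hg0, hg1, hp0, hp1,
                  show ¬ (parts.length < 3) from by omega, h13, hg3, hg4, hu4]
            · -- vendor specific
              have hsv : parts[3]'(by omega) ≠ "" ∧ parts[3]'(by omega) ≠ "*" ∧ PySem.Str.strip (parts[3]'(by omega)) ≠ "" := by
                simp [pvUnspecific] at hu3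
                exact ⟨hu3.1.1, hu3.1.2, hu3.2⟩
              have hcnt : (PySem.List.slice parts (some 2) (some 13)).foldl
                  (fun acc component =>
                    if component ≠ "" && component ≠ "*" && PySem.Str.strip component ≠ "" then acc + 1 else acc) 0 ≠ 0 :=
                pv_count_pos _ _ _ (pv_mem_slice parts 3 (by omega) (by omega) (by omega))
                  (by simp [hsv.1, hsv.2.1, hsv.2.2])
              have hA : ¬ ((!(decide (parts[3]'(by omega) ≠ "") && decide (parts[3]'(by omega) ≠ "*") && decide (PySem.Str.strip (parts[3]'(by omega)) ≠ "")) &&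
                  !(decide (parts[4]'(by omega) ≠ "") && decide (parts[4]'(by omega) ≠ "*") && decide (PySem.Str.strip (parts[4]'(by omega)) ≠ ""))) = true) := by
                simp [hsv.1, hsv.2.1, hsv.2.2]
              rw [if_neg hA, if_neg hcnt]
              simp [pvRules, List.findSome?, hg0, hg1, hp0, hp1,
                show ¬ (parts.length < 3) from by omega, h13, hg3, hg4, hu3]
      · -- no header: A invalid, B's first rule fires
        have hsw' : PySem.Chars.startswith s.toList "cpe:2.3:".toList = false := by
          cases hx : PySem.Chars.startswith s.toList "cpe:2.3:".toList
          · rfl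
          · exact absurd hx hsw
        have hcond : (decide (s = "") || !(PySem.Str.startswith s "cpe:2.3:")) = true := by
          simp
          right
          exact hsw'
        rw [if_pos hcond]
        set parts := (pvSplitC s.toList).map String.ofList with hpartsdef
        by_cases hl3 : 3 ≤ parts.length
        · have h0lt : 0 < parts.length := by omega
          have h1lt : 1 < parts.length := by omega
          have hg0 : (PySem.List.pyGet? parts 0).getD "" = parts[0]'(by omega) := by
            simp [PySem.List.pyGet?, PySem.List.pyIdx?, h0lt]
          have hg1 : (PySem.List.pyGet? parts 1).getD "" = parts[1]'(by omega) := by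
            simp [PySem.List.pyGet?, PySem.List.pyIdx?, h1lt]
          by_cases hc0 : parts[0]'(by omega) = "cpe"
          · by_cases hc1 : parts[1]'(by omega) = "2.3"
            · -- would be a valid header: contradicts hsw
              exfalso
              apply hsw
              apply (pv_shape_iff s.toList).mpr
              have hlS : 3 ≤ (pvSplitC s.toList).length := by simpa [hpartsdef] using hl3
              have h0S : (pvSplitC s.toList)[0]'(by omega) = "cpe".toList := by
                have he : parts[0]'(by omega) = String.ofList ((pvSplitC s.toList)[0]'(by omega)) := by
                  simp [hpartsdef]
                rw [he] at hc0
                simpa using congrArg String.toList hc0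
              have h1S : (pvSplitC s.toList)[1]'(by omega) = "2.3".toList := by
                have he : parts[1]'(by omega) = String.ofList ((pvSplitC s.toList)[1]'(by omega)) := by
                  simp [hpartsdef]
                rw [he] at hc1
                simpa using congrArg String.toList hc1
              refine ⟨hlS, ?_, ?_⟩
              · rw [List.getElem?_eq_getElem (by omega), h0S]
              · rw [List.getElem?_eq_getElem (by omega), h1S]
            · simp [pvRules, hg0, hg1, hc1]
          · simp [pvRules, hg0, hc0]
        · simp [pvRules, show parts.length < 3 from by omega]
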